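-- pv_equiv track=rewrite | github.com/nullfist/ThreatIntellAI | app/services/log_parser.py | parse_windows_event_log
-- ===== SOURCE A (Python) =====
-- from typing import List, Dict, Any, Tuple
--
-- def parse_windows_event_log(lines: List[str]) -> Dict[str, Any]:
--     """Parse Windows Event Log format"""
--     events = {
--         "failed_logins": [],
--         "account_lockouts": [],
--         "privilege_escalation": [],
--         "system_events": []
--     }
--
--     for line in lines:
--         line_lower = line.lower()
--
--         # Failed logins (Event ID 4625)
--         if any(term in line_lower for term in ['logon failure', '4625', 'failed login']):
--             events["failed_logins"].append(line)
--
--         # Account lockouts (Event ID 4740)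
--         elif any(term in line_lower for term in ['account locked', '4740']):
--             events["account_lockouts"].append(line)
--
--         # Privilege escalation
--         elif any(term in line_lower for term in ['privilege', 'elevation', 'sudo', 'runas']):
--             events["privilege_escalation"].append(line)
--
--         # System events
--         elif any(term in line_lower for term in ['system', 'service', 'started', 'stopped']):
--             events["system_events"].append(line)
--
--     return events
-- ===== SOURCE B (Python) =====
-- RULES = [
--     ("failed_logins", ["logon failure", "4625", "failed login"]),
--     ("account_lockouts", ["account locked", "4740"]),
--     ("privilege_escalation", ["privilege", "elevation", "sudo", "runas"]),
--     ("system_events", ["system", "service", "started", "stopped"]),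
-- ]
--
--
-- def parse_windows_event_log(lines):
--     """Parse Windows Event Log format"""
--     lowered = [l.lower() for l in lines]
--     events = {}
--     seen = []  # keywords of all earlier (higher-priority) categories
--     for cat, kws in RULES:
--         events[cat] = [l for l, ll in zip(lines, lowered)
--                        if any(k in ll for k in kws)
--                        and not any(k in ll for k in seen)]
--         seen = seen + kws
--     return events
-- ===== Notes on version B (the rewrite author's own statement) =====
-- stated objective: alternative
-- what changed: Replaces A's per-line if/elif first-match dispatch into a mutable dict by staged per-category passes: each category is produced by a single filter keeping lines that match its keywords and none of the cumulative keyword union of earlier categories, so no per-line rule chain exists at all.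
import Mathlib
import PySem

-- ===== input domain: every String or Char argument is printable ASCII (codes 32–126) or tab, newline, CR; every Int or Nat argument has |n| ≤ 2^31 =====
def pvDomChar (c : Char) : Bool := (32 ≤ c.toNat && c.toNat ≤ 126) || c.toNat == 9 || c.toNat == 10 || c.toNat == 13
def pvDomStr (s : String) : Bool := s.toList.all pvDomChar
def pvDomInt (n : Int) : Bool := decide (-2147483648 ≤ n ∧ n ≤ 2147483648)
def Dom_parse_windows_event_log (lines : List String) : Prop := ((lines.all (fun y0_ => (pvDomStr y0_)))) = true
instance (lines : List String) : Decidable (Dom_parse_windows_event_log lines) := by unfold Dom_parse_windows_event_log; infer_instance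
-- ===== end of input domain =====

-- B replaces A's per-line if/elif first-match dispatch by staged per-category filter
-- passes with cumulative exclusion of earlier categories' keywords (objective: alternative).

-- ===== PORT A =====
-- A's dict has four statically fixed keys; the port keeps its state as four lists in
-- insertion order and returns the association list in that order.
def pvStepA (st : List String × List String × List String × List String) (line : String) :
    List String × List String × List String × List String :=
  let ll := PySem.Str.lower line
  if (["logon failure", "4625", "failed login"].any fun t => PySem.Str.isIn t ll) then
    (st.1 ++ [line], st.2.1, st.2.2.1, st.2.2.2)
  else if (["account locked", "4740"].any fun t => PySem.Str.isIn t ll) then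
    (st.1, st.2.1 ++ [line], st.2.2.1, st.2.2.2)
  else if (["privilege", "elevation", "sudo", "runas"].any fun t => PySem.Str.isIn t ll) then
    (st.1, st.2.1, st.2.2.1 ++ [line], st.2.2.2)
  else if (["system", "service", "started", "stopped"].any fun t => PySem.Str.isIn t ll) then
    (st.1, st.2.1, st.2.2.1, st.2.2.2 ++ [line])
  else st

def parse_windows_event_log (lines : List String) : List (String × List String) :=
  let st := lines.foldl pvStepA ([], [], [], [])
  [("failed_logins", st.1), ("account_lockouts", st.2.1),
   ("privilege_escalation", st.2.2.1), ("system_events", st.2.2.2)]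

-- ===== PORT B =====
def pvRules : List (String × List String) :=
  [("failed_logins", ["logon failure", "4625", "failed login"]),
   ("account_lockouts", ["account locked", "4740"]),
   ("privilege_escalation", ["privilege", "elevation", "sudo", "runas"]),
   ("system_events", ["system", "service", "started", "stopped"])]

def pvMatch (kws : List String) (ll : String) : Bool := kws.any fun k => PySem.Str.isIn k ll

def parse_windows_event_log_alt (lines : List String) : List (String × List String) :=
  let lowered := lines.map PySem.Str.lower
  let pairs := lines.zip lowered
  (pvRules.foldl
    (fun (st : List (String × List String) × List String) r =>
      (st.1 ++ [(r.1,
         (pairs.filter fun p => pvMatch r.2 p.2 && !(pvMatch st.2 p.2)).map (·.1))],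
       st.2 ++ r.2))
    ([], [])).1

-- ===== PRECONDITION & SPEC =====
def Spec_parse_windows_event_log (lines : List String) (out : List (String × List String)) : Prop := out = parse_windows_event_log_alt lines
instance (lines : List String) (out : List (String × List String)) : Decidable (Spec_parse_windows_event_log lines out) := by unfold Spec_parse_windows_event_log; infer_instance

-- ===== CLAIM (what is proved, stated in full; the proofs are below) =====
def Claim_equal_parse_windows_event_log : Prop := ∀ (lines : List String), Dom_parse_windows_event_log lines → Spec_parse_windows_event_log lines (parse_windows_event_log lines)

-- ===== LEMMAS AND PROOFS =====

-- abbreviations for the four branch tests of line `l`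
def pvC1 (l : String) : Bool := ["logon failure", "4625", "failed login"].any fun t => PySem.Str.isIn t (PySem.Str.lower l)
def pvC2 (l : String) : Bool := ["account locked", "4740"].any fun t => PySem.Str.isIn t (PySem.Str.lower l)
def pvC3 (l : String) : Bool := ["privilege", "elevation", "sudo", "runas"].any fun t => PySem.Str.isIn t (PySem.Str.lower l)
def pvC4 (l : String) : Bool := ["system", "service", "started", "stopped"].any fun t => PySem.Str.isIn t (PySem.Str.lower l)

-- A's fold characterised by per-branch filters (elif = this test and no earlier one)
lemma pvFoldA_eq (lines : List String) (a b c d : List String) :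
    lines.foldl pvStepA (a, b, c, d) =
      (a ++ lines.filter (fun l => pvC1 l),
       b ++ lines.filter (fun l => !pvC1 l && pvC2 l),
       c ++ lines.filter (fun l => !pvC1 l && !pvC2 l && pvC3 l),
       d ++ lines.filter (fun l => !pvC1 l && !pvC2 l && !pvC3 l && pvC4 l)) := by
  induction lines generalizing a b c d with
  | nil => simp
  | cons l rest ih =>
    simp only [List.foldl_cons, List.filter_cons, pvStepA]
    rw [show (["logon failure", "4625", "failed login"].any fun t => PySem.Str.isIn t (PySem.Str.lower l)) = pvC1 l from rfl,
        show (["account locked", "4740"].any fun t => PySem.Str.isIn t (PySem.Str.lower l)) = pvC2 l from rfl,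
        show (["privilege", "elevation", "sudo", "runas"].any fun t => PySem.Str.isIn t (PySem.Str.lower l)) = pvC3 l from rfl,
        show (["system", "service", "started", "stopped"].any fun t => PySem.Str.isIn t (PySem.Str.lower l)) = pvC4 l from rfl]
    cases h1 : pvC1 l <;> cases h2 : pvC2 l <;> cases h3 : pvC3 l <;> cases h4 : pvC4 l <;>
      simp only [if_true, if_false, Bool.false_eq_true] <;>
      rw [ih] <;> simp_all

-- filtering the (line, lowered-line) zip on the lowered component = filtering the lines
lemma pvZipFilter (lines : List String) (kws seen : List String) :
    (((lines.zip (lines.map PySem.Str.lower)).filter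
        fun p => pvMatch kws p.2 && !(pvMatch seen p.2)).map (·.1)) =
      lines.filter (fun l => pvMatch kws (PySem.Str.lower l) && !(pvMatch seen (PySem.Str.lower l))) := by
  induction lines with
  | nil => rfl
  | cons l rest ih =>
    simp only [List.map_cons, List.zip_cons_cons, List.filter_cons]
    cases h : pvMatch kws (PySem.Str.lower l) && !(pvMatch seen (PySem.Str.lower l)) <;> simp [ih]

-- recognising the concrete keyword lists of pvRules as the four branch tests
lemma pvMatch_nil (ll : String) : pvMatch [] ll = false := rfl
lemma pvM1 (l : String) : pvMatch ["logon failure", "4625", "failed login"] (PySem.Str.lower l) = pvC1 l := rfl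
lemma pvM2 (l : String) : pvMatch ["account locked", "4740"] (PySem.Str.lower l) = pvC2 l := rfl
lemma pvM3 (l : String) : pvMatch ["privilege", "elevation", "sudo", "runas"] (PySem.Str.lower l) = pvC3 l := rfl
lemma pvM4 (l : String) : pvMatch ["system", "service", "started", "stopped"] (PySem.Str.lower l) = pvC4 l := rfl
lemma pvM12 (l : String) : pvMatch ["logon failure", "4625", "failed login", "account locked", "4740"] (PySem.Str.lower l) = (pvC1 l || pvC2 l) := by
  simp [pvMatch, pvC1, pvC2, Bool.or_assoc]
lemma pvM123 (l : String) : pvMatch ["logon failure", "4625", "failed login", "account locked", "4740", "privilege", "elevation", "sudo", "runas"] (PySem.Str.lower l) = (pvC1 l || pvC2 l || pvC3 l) := by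
  simp [pvMatch, pvC1, pvC2, pvC3, Bool.or_assoc]

-- ===== VERDICT (by name: the statement is the Claim_ definition above) =====
set_option maxHeartbeats 1600000 in
theorem parse_windows_event_log_spec : Claim_equal_parse_windows_event_log := by
  intro lines _
  unfold Spec_parse_windows_event_log parse_windows_event_log parse_windows_event_log_alt
  rw [pvFoldA_eq]
  simp only [pvRules, List.foldl_cons, List.foldl_nil, List.nil_append]
  rw [pvZipFilter, pvZipFilter, pvZipFilter, pvZipFilter]
  simp only [List.nil_append, List.cons_append]
  refine congrArg₂ _ ?_ (congrArg₂ _ ?_ (congrArg₂ _ ?_ (congrArg₂ _ ?_ rfl))) <;>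
    refine congrArg _ (List.filter_congr fun l _ => ?_) <;>
    simp only [pvM1, pvM2, pvM3, pvM4, pvM12, pvM123, pvMatch_nil, Bool.not_false, Bool.and_true] <;>
    cases pvC1 l <;> cases pvC2 l <;> cases pvC3 l <;> cases pvC4 l <;> rfl
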